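-- pv_equiv track=rewrite | github.com/ahmedfahad04/Python-Lessons | Client's Tasks/Canada/Practices/Exam Solutions/2017_April/extra(26).py | buildLibrary
-- ===== SOURCE A (Python) =====
-- def buildLibrary(authors, titles):
--     library = {}
--     for a,t in zip(authors,titles):
--         if a not in library.keys():
--             library[a] = [t]
--         else:
--             library[a].append(t)
--
--     return library
-- ===== SOURCE B (Python) =====
-- def buildLibrary(authors, titles):
--     pairs = list(zip(authors, titles))
--     return {a: [t for a2, t in pairs if a2 == a]
--             for a in dict.fromkeys(a2 for a2, _ in pairs)}
-- ===== Notes on version B (the rewrite author's own statement) =====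
-- stated objective: alternative
-- what changed: Replaces A's single streaming dict accumulation (branch on key presence, append in place) with an index-then-filter pass: first the distinct authors in first-appearance order, then one filter over the zipped pairs per distinct author.
import Mathlib
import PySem

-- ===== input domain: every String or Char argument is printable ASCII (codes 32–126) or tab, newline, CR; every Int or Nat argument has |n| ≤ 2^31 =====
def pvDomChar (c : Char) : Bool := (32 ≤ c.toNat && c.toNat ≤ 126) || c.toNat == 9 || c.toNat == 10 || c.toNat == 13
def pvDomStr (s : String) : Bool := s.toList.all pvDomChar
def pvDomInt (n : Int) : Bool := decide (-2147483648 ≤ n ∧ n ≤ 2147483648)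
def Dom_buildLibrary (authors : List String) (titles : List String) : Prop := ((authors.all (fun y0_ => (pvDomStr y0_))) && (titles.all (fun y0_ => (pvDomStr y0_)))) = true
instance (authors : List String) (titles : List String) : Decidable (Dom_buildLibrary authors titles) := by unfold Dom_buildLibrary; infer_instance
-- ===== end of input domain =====

-- B groups by an index-then-filter pass (distinct authors first, then one filter per author)
-- instead of A's streaming dict accumulation; same cost class, alternative decomposition.

-- ===== PORT A =====
def buildLibrary (authors : List String) (titles : List String) : List (String × List String) :=
  ((authors.zip titles).foldl
    (fun library p =>
      if p.1 ∈ library.keys then library.modify p.1 [] (fun l => l ++ [p.2])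
      else library.insert p.1 [p.2])
    PySem.Dict.empty).items

-- ===== PORT B =====
def buildLibrary_alt (authors : List String) (titles : List String) : List (String × List String) :=
  let pairs := authors.zip titles
  (PySem.List.dedup (pairs.map (·.1))).map
    (fun a => (a, (pairs.filter (fun p => p.1 == a)).map (·.2)))

-- ===== PRECONDITION & SPEC =====
def Spec_buildLibrary (authors : List String) (titles : List String) (out : List (String × List String)) : Prop := out = buildLibrary_alt authors titles
instance (authors : List String) (titles : List String) (out : List (String × List String)) : Decidable (Spec_buildLibrary authors titles out) := by unfold Spec_buildLibrary; infer_instance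

-- ===== CLAIM (what is proved, stated in full; the proofs are below) =====
def Claim_equal_buildLibrary : Prop := ∀ (authors : List String) (titles : List String), Dom_buildLibrary authors titles → Spec_buildLibrary authors titles (buildLibrary authors titles)

-- ===== LEMMAS AND PROOFS =====

-- A's branch collapses: inserting [t] at a fresh key is the same dict as modify with default [].
lemma step_eq_modify (d : PySem.Dict String (List String)) (p : String × String) :
    (if p.1 ∈ d.keys then d.modify p.1 [] (fun l => l ++ [p.2])
     else d.insert p.1 [p.2]) = d.modify p.1 [] (fun l => l ++ [p.2]) := by
  by_cases h : p.1 ∈ d.keys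
  · simp [h]
  · have hc : d.contains p.1 = false := by
      rw [← Bool.not_eq_true, PySem.Dict.contains_iff_mem_keys]; exact h
    rw [if_neg h, PySem.Dict.modify, PySem.Dict.getD_of_not_contains (h := hc)]
    rfl

lemma loop_eq_modify_fold (l : List (String × String)) :
    l.foldl
      (fun library p =>
        if p.1 ∈ library.keys then library.modify p.1 [] (fun l => l ++ [p.2])
        else library.insert p.1 [p.2])
      PySem.Dict.empty
    = l.foldl (fun d p => d.modify p.1 [] (fun l => l ++ [p.2])) PySem.Dict.empty := by
  have hfun : (fun (library : PySem.Dict String (List String)) (p : String × String) =>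
      if p.1 ∈ library.keys then library.modify p.1 [] (fun l => l ++ [p.2])
      else library.insert p.1 [p.2])
      = fun d p => d.modify p.1 [] (fun l => l ++ [p.2]) := by
    funext d p; exact step_eq_modify d p
  rw [hfun]

-- ===== VERDICT (by name: the statement is the Claim_ definition above) =====
theorem buildLibrary_spec : Claim_equal_buildLibrary := by
  intro authors titles _
  unfold Spec_buildLibrary buildLibrary buildLibrary_alt
  rw [loop_eq_modify_fold]
  have hnd : ((authors.zip titles).foldl
      (fun d p => d.modify p.1 [] (fun l => l ++ [p.2])) PySem.Dict.empty).keys.Nodup :=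
    PySem.Dict.nodup_keys_foldl_modify_key (authors.zip titles) Prod.fst []
      (fun _ p l => l ++ [p.2]) PySem.Dict.empty (by simp [pysem])
  rw [PySem.Dict.items_eq_map_keys _ hnd []]
  rw [PySem.Dict.keys_foldl_modify_key (authors.zip titles) Prod.fst []
      (fun _ p l => l ++ [p.2]) PySem.Dict.empty]
  simp [pysem, PySem.Dict.getD_foldl_modify_append]
  simp [PySem.Set.ofList, List.foldl_map, PySem.Set.empty]
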